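-- pv_equiv track=rewrite | github.com/grey920/python-algorythm | w2/sort/day8_2309.py | solution
-- ===== SOURCE A (Python) =====
-- def solution(heights:list):
--     heights_sum = sum(heights)
--     target_sum = heights_sum - 100  # 7난장이가 아닌 난장이 두 명의 키 합
--
--     heights.sort()  # 오름차순 정렬
--     # 범인 난장이 두 명 찾기 (two pointer)
--     left = 0
--     right = len(heights) - 1
--     while left <= right:
--         if heights[left] + heights[right] == target_sum:
--             return heights[left], heights[right]
--         elif heights[left] + heights[right] > target_sum:
--             right -= 1
--         else:
--             left += 1
--     return None
-- ===== SOURCE B (Python) =====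
-- def solution(heights: list):
--     target = sum(heights) - 100
--     heights.sort()
--     n = len(heights)
--     for i in range(n):
--         for j in range(i, n):  # j starts at i: a dwarf may pair with itself only as in A's left==right case
--             if heights[i] + heights[j] == target:
--                 return heights[i], heights[j]
--     return None
-- ===== Notes on version B (the rewrite author's own statement) =====
-- stated objective: simpler
-- what changed: Replaces the two-pointer scan over the sorted list with a plain first-match nested scan (i ascending, j from i ascending); on sorted input the first pair found has the same values as the two-pointer's.
import Mathlib
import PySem

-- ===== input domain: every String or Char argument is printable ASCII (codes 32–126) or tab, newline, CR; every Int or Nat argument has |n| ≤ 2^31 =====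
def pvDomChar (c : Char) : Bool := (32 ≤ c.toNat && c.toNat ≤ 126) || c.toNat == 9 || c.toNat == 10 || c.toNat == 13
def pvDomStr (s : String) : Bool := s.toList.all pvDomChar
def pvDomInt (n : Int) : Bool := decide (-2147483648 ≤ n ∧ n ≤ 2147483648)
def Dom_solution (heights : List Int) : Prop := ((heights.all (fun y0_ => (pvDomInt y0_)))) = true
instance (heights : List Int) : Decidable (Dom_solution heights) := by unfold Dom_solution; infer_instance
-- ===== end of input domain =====

-- B replaces A's two-pointer scan with a first-match nested scan over the sorted list (same return
-- values; simpler); like A, B sorts the caller's list in place — the equivalence proved is about the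
-- return value (both ports sort functionally).


-- ===== PORT A =====
-- the 'while left <= right' two-pointer loop; indices stay in range, so the
-- pyGet? 'none' branch is unreachable (Python never raises here)
def solutionLoop (xs : List Int) (t : Int) (l r : Int) : Option (Int × Int) :=
  if _h : l ≤ r then
    match PySem.List.pyGet? xs l, PySem.List.pyGet? xs r with
    | some a, some b =>
      if a + b = t then some (a, b)
      else if a + b > t then solutionLoop xs t l (r - 1)
      else solutionLoop xs t (l + 1) r
    | _, _ => none
  else none
termination_by (r + 1 - l).toNat
decreasing_by all_goals omega

def solution (heights : List Int) : Option (Int × Int) :=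
  let heights_sum := heights.sum
  let target_sum := heights_sum - 100
  let hsorted := PySem.List.sorted heights (fun x => x) false
  solutionLoop hsorted target_sum 0 ((hsorted.length : Int) - 1)

-- ===== PORT B =====
-- inner loop 'for j in range(i, n)': scan the suffix starting AT i for a partner
def altInner (a t : Int) : List Int → Option Int
  | [] => none
  | b :: rest => if a + b = t then some b else altInner a t rest

-- outer loop 'for i in range(n)'
def altOuter (t : Int) : List Int → Option (Int × Int)
  | [] => none
  | a :: rest =>
    match altInner a t (a :: rest) with
    | some b => some (a, b)
    | none => altOuter t rest

def solution_alt (heights : List Int) : Option (Int × Int) :=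
  let target := heights.sum - 100
  altOuter target (PySem.List.sorted heights (fun x => x) false)

-- ===== PRECONDITION & SPEC =====
def Spec_solution (heights : List Int) (out : Option (Int × Int)) : Prop := out = solution_alt heights
instance (heights : List Int) (out : Option (Int × Int)) : Decidable (Spec_solution heights out) := by unfold Spec_solution; infer_instance

-- ===== CLAIM (what is proved, stated in full; the proofs are below) =====
def Claim_equal_solution : Prop := ∀ (heights : List Int), Dom_solution heights → Spec_solution heights (solution heights)

-- ===== LEMMAS AND PROOFS =====

theorem altInner_some {ys : List Int} {a t d : Int} (h : altInner a t ys = some d) :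
    a + d = t ∧ d ∈ ys := by
  induction ys with
  | nil => simp [altInner] at h
  | cons b rest ih =>
    by_cases hb : a + b = t
    · simp [altInner, hb] at h; subst h; exact ⟨hb, List.mem_cons_self⟩
    · simp [altInner, hb] at h
      obtain ⟨h1, h2⟩ := ih h
      exact ⟨h1, List.mem_cons_of_mem _ h2⟩

theorem altInner_total {ys : List Int} {a t c : Int} (hc : c ∈ ys) (h : a + c = t) :
    ∃ d, altInner a t ys = some d := by
  induction ys with
  | nil => simp at hc
  | cons b rest ih =>
    by_cases hb : a + b = t
    · exact ⟨b, by simp [altInner, hb]⟩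
    · rcases List.mem_cons.mp hc with rfl | hc'
      · exact absurd h hb
      · obtain ⟨d, hd⟩ := ih hc'
        exact ⟨d, by simp [altInner, hb, hd]⟩

theorem altInner_none {ys : List Int} {a t : Int} (h : ∀ c ∈ ys, a + c ≠ t) :
    altInner a t ys = none := by
  induction ys with
  | nil => rfl
  | cons b rest ih =>
    simp [altInner, h b List.mem_cons_self]
    exact ih (fun c hc => h c (List.mem_cons_of_mem _ hc))

theorem altInner_append {ys : List Int} {a b t : Int} (h : a + b ≠ t) :
    altInner a t (ys ++ [b]) = altInner a t ys := by
  induction ys with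
  | nil => simp [altInner, h]
  | cons c rest ih => by_cases hc : a + c = t <;> simp [altInner, hc, ih]

theorem altOuter_append {ys : List Int} {b t : Int} (h : ∀ c ∈ ys ++ [b], c + b ≠ t) :
    altOuter t (ys ++ [b]) = altOuter t ys := by
  induction ys with
  | nil =>
    simp only [List.nil_append, altOuter, altInner]
    simp [h b (by simp)]
  | cons c rest ih =>
    have hcb : c + b ≠ t := h c (by simp)
    simp only [List.cons_append, altOuter]
    rw [show c :: (rest ++ [b]) = (c :: rest) ++ [b] by simp,
        altInner_append hcb]
    cases hinner : altInner c t (c :: rest) with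
    | some d => rfl
    | none => exact ih (fun x hx => h x (by simp at hx ⊢; tauto))

-- the two-pointer on the window [l..r] of a sorted list equals the nested scan on that window
theorem tp_eq (xs : List Int) (t : Int) (hs : xs.Pairwise (· ≤ ·)) :
    ∀ (k : Nat) (l r : Int), 0 ≤ l → r < (xs.length : Int) → (r + 1 - l).toNat = k →
      solutionLoop xs t l r = altOuter t ((xs.drop l.toNat).take k) := by
  intro k
  induction k with
  | zero =>
    intro l r hl hr hk
    have : ¬ l ≤ r := by omega
    rw [solutionLoop]
    simp [this, altOuter]
  | succ k ih =>
    intro l r hl hr hk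
    have hlr : l ≤ r := by omega
    have hr0 : 0 ≤ r := le_trans hl hlr
    set nl := l.toNat with hnl
    set nr := r.toNat with hnr
    have hnlr : nl ≤ nr := by omega
    have hnrlen : nr < xs.length := by omega
    have hklen : nl + (k + 1) ≤ xs.length := by omega
    set w : List Int := (xs.drop nl).take (k + 1) with hw
    have hwlen : w.length = k + 1 := by
      simp [hw, List.length_take, List.length_drop]; omega
    have hsw : w.Pairwise (fun a b => a ≤ b) :=
      hs.sublist ((List.take_sublist _ _).trans (List.drop_sublist _ _))
    have hw0 : w[0]'(by omega) = xs[nl] := by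
      simp [hw, List.getElem_take, List.getElem_drop]
    have hwk : w[k]'(by omega) = xs[nr] := by
      simp only [hw, List.getElem_take, List.getElem_drop]
      congr 1; omega
    have hga : PySem.List.pyGet? xs l = some xs[nl] :=
      PySem.List.pyGet?_eq_some_getElem xs hl (by omega)
    have hgb : PySem.List.pyGet? xs r = some xs[nr] :=
      PySem.List.pyGet?_eq_some_getElem xs hr0 hr
    set a := xs[nl] with hadef
    set b := xs[nr] with hbdef
    -- w's head is a, w's last is b
    have hne : w ≠ [] := by intro h; rw [h] at hwlen; simp at hwlen
    have hlast : w.getLast hne = b := by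
      rw [List.getLast_eq_getElem]; simp only [hwlen]; simpa using hwk
    obtain ⟨a', w', hwcons⟩ := List.exists_cons_of_ne_nil hne
    have ha' : a' = a := by
      have h0 : w[0]'(by omega) = a := hw0
      simp only [hwcons, List.getElem_cons_zero] at h0
      exact h0
    subst ha'
    have hdecomp : w = w.dropLast ++ [b] := by
      conv_lhs => rw [← List.dropLast_append_getLast hne]
      rw [hlast]
    have hbw : b ∈ w := by rw [hdecomp]; simp
    -- every element of w lies between a and b
    have hmem_le_b : ∀ c ∈ w, c ≤ b := by
      intro c hc
      have hsw2 := hsw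
      rw [hdecomp] at hsw2 hc
      rcases List.mem_append.mp hc with h1 | h1
      · exact (List.pairwise_append.mp hsw2).2.2 c h1 b (by simp)
      · simp at h1; exact le_of_eq h1
    have ha_le_mem : ∀ c ∈ w, a ≤ c := by
      intro c hc
      have hsw2 := hsw
      rw [hwcons] at hsw2 hc
      rcases List.mem_cons.mp hc with rfl | h1
      · exact le_refl _
      · exact (List.pairwise_cons.mp hsw2).1 c h1
    rw [solutionLoop]
    simp only [hlr, dite_true, hga, hgb]
    by_cases heq : a + b = t
    · -- A returns (a, b); B's scan from a finds a first partner, whose value must also be b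
      rw [if_pos heq]
      obtain ⟨d, hd⟩ := altInner_total hbw heq
      obtain ⟨hd1, -⟩ := altInner_some hd
      have hdb : d = b := by omega
      subst hdb
      rw [hwcons] at hd
      conv_rhs => rw [hwcons]
      simp only [altOuter, hd]
    · by_cases hgt : a + b > t
      · -- drop the last element: b is too large to be anyone's partner
        rw [if_neg heq, if_pos hgt]
        have hrec := ih l (r - 1) hl (by omega) (by omega)
        have hdl : w.dropLast = (xs.drop nl).take k := by
          rw [hw, List.dropLast_eq_take, List.take_take]
          congr 1
          simp [List.length_take, List.length_drop]
          omega
        have hnomatch : ∀ c ∈ w.dropLast ++ [b], c + b ≠ t := by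
          intro c hc
          rw [← hdecomp] at hc
          have := ha_le_mem c hc
          omega
        have hstep : altOuter t w = altOuter t w.dropLast := by
          conv_lhs => rw [hdecomp]
          exact altOuter_append hnomatch
        rw [hrec, ← hdl]
        exact hstep.symm
      · -- advance the left pointer: a is too small to have any partner
        have hlt : a + b < t := by omega
        rw [if_neg heq, if_neg hgt]
        have hrec := ih (l + 1) r (by omega) hr (by omega)
        have hl1 : (l + 1).toNat = nl + 1 := by omega
        have htl : (xs.drop (nl + 1)).take k = w' := by
          have h1 : xs.drop (nl + 1) = (xs.drop nl).tail := by rw [List.tail_drop]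
          rw [h1]
          have h2 : (xs.drop nl).take (k + 1) = a :: w' := by rw [← hw, hwcons]
          cases hdx : xs.drop nl with
          | nil => rw [hdx] at h2; simp at h2
          | cons y ys =>
            rw [hdx] at h2
            simp only [List.take_succ_cons, List.cons.injEq] at h2
            simp [h2.2]
        have hnoa : altInner a t (a :: w') = none := by
          apply altInner_none
          intro c hc
          have hcw : c ∈ w := by rw [hwcons]; exact hc
          have := hmem_le_b c hcw
          omega
        rw [hrec, hl1, htl, hwcons]
        simp only [altOuter, hnoa]

-- ===== VERDICT (by name: the statement is the Claim_ definition above) =====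
theorem solution_spec : Claim_equal_solution := by
  intro heights _
  unfold Spec_solution solution solution_alt
  simp only []
  set ys := PySem.List.sorted heights (fun x => x) false with hys
  have hs : ys.Pairwise (fun a b => a ≤ b) := PySem.List.sorted_pairwise heights (fun x => x)
  have h := tp_eq ys (heights.sum - 100) hs ys.length 0 ((ys.length : Int) - 1)
    le_rfl (by omega) (by omega)
  rw [h]
  simp
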